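-- pv_equiv track=rewrite | github.com/ni/measurement-plugin-python | packages/generator/ni_measurement_plugin_sdk_generator/client/_support.py | _get_python_identifier
-- ===== SOURCE A (Python) =====
-- import keyword
--
-- _INVALID_CHARS = "`~!@#$%^&*()-+={}[]\\|:;',<>.?/ \n"
--
-- def _get_python_identifier(input_string: str) -> str:
--     valid_identifier = input_string.lower()
--     if not valid_identifier.isidentifier():
--         for invalid_char in _INVALID_CHARS:
--             valid_identifier = valid_identifier.replace(invalid_char, "_")
--
--     if valid_identifier[0].isdigit() or keyword.iskeyword(valid_identifier):
--         valid_identifier = f"_{valid_identifier}"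
--     return valid_identifier
-- ===== SOURCE B (Python) =====
-- _INVALID_CHARS = "`~!@#$%^&*()-+={}[]\\|:;',<>.?/ \n"
--
-- # keyword.kwlist of CPython 3, inlined (keyword.iskeyword is membership in this set)
-- _KEYWORDS = frozenset([
--     "False", "None", "True", "and", "as", "assert", "async", "await", "break",
--     "class", "continue", "def", "del", "elif", "else", "except", "finally",
--     "for", "from", "global", "if", "import", "in", "is", "lambda", "nonlocal",
--     "not", "or", "pass", "raise", "return", "try", "while", "with", "yield",
-- ])
--
-- def _get_python_identifier(input_string: str) -> str:
--     valid_identifier = "".join(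
--         "_" if ch in _INVALID_CHARS else ch for ch in input_string.lower()
--     )
--     if valid_identifier[0].isdigit() or valid_identifier in _KEYWORDS:
--         valid_identifier = f"_{valid_identifier}"
--     return valid_identifier
-- ===== Notes on version B (the rewrite author's own statement) =====
-- stated objective: simpler
-- what changed: A rescans the whole string once per invalid character (31 full .replace passes) after an isidentifier() guard; B builds the result in a single pass over the lowercased characters with a per-character membership test, dropping the guard (a no-op, since valid identifiers contain no invalid characters).
import Mathlib
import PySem

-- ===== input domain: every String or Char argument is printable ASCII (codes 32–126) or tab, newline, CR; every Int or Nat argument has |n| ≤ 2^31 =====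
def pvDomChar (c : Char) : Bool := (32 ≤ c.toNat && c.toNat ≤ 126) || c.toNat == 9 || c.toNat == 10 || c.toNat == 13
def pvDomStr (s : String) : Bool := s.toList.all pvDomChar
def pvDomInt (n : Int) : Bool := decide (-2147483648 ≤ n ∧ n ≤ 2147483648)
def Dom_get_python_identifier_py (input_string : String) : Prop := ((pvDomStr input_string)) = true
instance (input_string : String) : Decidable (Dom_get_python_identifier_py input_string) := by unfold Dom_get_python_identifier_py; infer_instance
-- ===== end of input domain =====

-- B replaces A's per-invalid-char repeated full-string .replace scans by one pass over the
-- lowercased characters (objective: simpler; return value only, no mutation involved).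

-- shared module constant _INVALID_CHARS
def pvInvalidChars : String := "`~!@#$%^&*()-+={}[]\\|:;',<>.?/ \n"

-- keyword.kwlist of CPython 3 (keyword.iskeyword = membership in this list); exact
def pvKeywords : List String := ["False", "None", "True", "and", "as", "assert", "async",
  "await", "break", "class", "continue", "def", "del", "elif", "else", "except", "finally",
  "for", "from", "global", "if", "import", "in", "is", "lambda", "nonlocal", "not", "or",
  "pass", "raise", "return", "try", "while", "with", "yield"]

-- str.isidentifier(), ported by hand: exact on the ASCII domain (first char letter or '_',
-- rest letters/digits/'_', nonempty)
def pyIsIdentifierAscii : List Char → Bool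
  | [] => false
  | c :: t => (PySem.Chars.isalpha c || c == '_') &&
      t.all (fun ch => PySem.Chars.isalnum ch || ch == '_')

-- ===== PORT A =====
-- A's last two lines: valid_identifier[0] raises IndexError on the empty string (excluded by Pre_)
def pyFinishA (valid : String) : String :=
  match PySem.Str.pyGet? valid 0 with
  | none => ""  -- IndexError; excluded by Pre_
  | some c0 =>
    if PySem.Chars.isdigit c0 || pvKeywords.contains valid then "_" ++ valid else valid

def get_python_identifier_py (input_string : String) : String :=
  let valid0 := PySem.Str.lower input_string
  let valid :=
    if pyIsIdentifierAscii valid0.toList then valid0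
    else pvInvalidChars.toList.foldl
      (fun s invalid_char => PySem.Str.replace s (String.ofList [invalid_char]) "_") valid0
  pyFinishA valid

-- ===== PORT B =====
-- B's last two lines, identical Python code to A's: same IndexError on the empty string
def pyFinishB (valid : String) : String :=
  match PySem.Str.pyGet? valid 0 with
  | none => ""  -- IndexError; excluded by Pre_
  | some c0 =>
    if PySem.Chars.isdigit c0 || pvKeywords.contains valid then "_" ++ valid else valid

def get_python_identifier_py_alt (input_string : String) : String :=
  let valid := String.ofList ((PySem.Str.lower input_string).toList.map
    (fun ch => if pvInvalidChars.toList.contains ch then '_' else ch))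
  pyFinishB valid

-- ===== PRECONDITION & SPEC =====
-- Pre_ excludes only the empty string, on which both A and B raise IndexError at valid_identifier[0].
def Pre_get_python_identifier_py (input_string : String) : Prop := input_string ≠ ""
instance (input_string : String) : Decidable (Pre_get_python_identifier_py input_string) := by
  unfold Pre_get_python_identifier_py; infer_instance
def pvWitness_get_python_identifier_py : String := "Hello World"

def Spec_get_python_identifier_py (input_string : String) (out : String) : Prop :=
  out = get_python_identifier_py_alt input_string
instance (input_string : String) (out : String) : Decidable (Spec_get_python_identifier_py input_string out) := by
  unfold Spec_get_python_identifier_py; infer_instance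

-- ===== CLAIM (what is proved, stated in full; the proofs are below) =====
def Claim_equal_get_python_identifier_py : Prop := ∀ (input_string : String), Dom_get_python_identifier_py input_string → Pre_get_python_identifier_py input_string → Spec_get_python_identifier_py input_string (get_python_identifier_py input_string)

-- ===== LEMMAS AND PROOFS =====

-- single-char replace is a map
theorem replace_go_single (o : Char) :
    ∀ (fuel : Nat) (l acc : List Char), l.length ≤ fuel →
      PySem.Chars.replace.go [o] ['_'] fuel l acc =
        acc.reverse ++ l.map (fun c => if c = o then '_' else c) := by
  intro fuel
  induction fuel with
  | zero => intro l acc h; cases l with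
    | nil => simp [PySem.Chars.replace.go]
    | cons c t => simp at h
  | succ n ih =>
    intro l acc h
    cases l with
    | nil => simp [PySem.Chars.replace.go]
    | cons c t =>
      simp only [PySem.Chars.replace.go]
      by_cases hc : c = o
      · have : List.isPrefixOf [o] (c :: t) = true := by
          simp [List.isPrefixOf, hc]
        rw [if_pos this]
        have hd : List.drop [o].length (c :: t) = t := rfl
        have ht : t.length ≤ n := by simpa using h
        rw [hd, ih _ _ ht]
        simp [hc]
      · have : List.isPrefixOf [o] (c :: t) = false := by
          simp [List.isPrefixOf]
          exact fun he => absurd he.symm hc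
        rw [if_neg (by simp [this])]
        have ht : t.length ≤ n := by simpa using h
        rw [ih _ _ ht]
        simp [hc]

theorem replace_single (o : Char) (s : List Char) :
    PySem.Chars.replace s [o] ['_'] = s.map (fun c => if c = o then '_' else c) := by
  rw [PySem.Chars.replace]
  simp only [List.isEmpty_cons, if_false, Bool.false_eq_true]
  simpa using replace_go_single o s.length s []

-- the fold of single-char replaces over L equals one map, provided '_' ∉ L
theorem fold_map (L : List Char) (h : '_' ∉ L) (s : List Char) :
    L.foldl (fun s c => s.map (fun ch => if ch = c then '_' else ch)) s =
      s.map (fun ch => if ch ∈ L then '_' else ch) := by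
  induction L generalizing s with
  | nil => simp
  | cons c L' ih =>
    simp only [List.foldl_cons]
    rw [ih (fun hm => h (List.mem_cons_of_mem _ hm)), List.map_map]
    refine List.map_congr_left ?_
    intro ch _
    by_cases hc : ch = c
    · have h' : '_' ∉ L' := fun hm => h (List.mem_cons_of_mem _ hm)
      simp [Function.comp, hc, h']
    · simp [Function.comp, hc, List.mem_cons]

theorem fold_str (L : List Char) (s : String) :
    (L.foldl (fun s c => PySem.Str.replace s (String.ofList [c]) "_") s).toList =
      L.foldl (fun l c => l.map (fun ch => if ch = c then '_' else ch)) s.toList := by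
  induction L generalizing s with
  | nil => simp
  | cons c L' ih =>
    simp only [List.foldl_cons]
    rw [ih]
    congr 1
    rw [PySem.Str.toList_replace]
    have h1 : (String.ofList [c]).toList = [c] := String.toList_ofList
    have h2 : "_".toList = ['_'] := rfl
    rw [h1, h2]
    exact replace_single c s.toList

-- no invalid char is alphanumeric or '_'
theorem invalid_not_ident_bool : pvInvalidChars.toList.all
    (fun c => !PySem.Chars.isalpha c && !PySem.Chars.isalnum c && !(c == '_')) = true := by rfl

theorem invalid_not_ident : ∀ c ∈ pvInvalidChars.toList,
    PySem.Chars.isalpha c = false ∧ PySem.Chars.isalnum c = false ∧ c ≠ '_' := by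
  have h := invalid_not_ident_bool
  simp only [List.all_eq_true, Bool.and_eq_true, Bool.not_eq_true'] at h
  intro c hc
  obtain ⟨⟨h1, h2⟩, h3⟩ := h c hc
  exact ⟨h1, h2, fun he => by simp [he] at h3⟩

set_option maxRecDepth 4000 in
theorem underscore_not_invalid : '_' ∉ pvInvalidChars.toList := by decide

theorem ident_map_id (l : List Char) (h : pyIsIdentifierAscii l = true) :
    l.map (fun ch => if ch ∈ pvInvalidChars.toList then '_' else ch) = l := by
  cases l with
  | nil => simp
  | cons c t =>
    simp only [pyIsIdentifierAscii, Bool.and_eq_true, List.all_eq_true] at h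
    obtain ⟨h1, h2⟩ := h
    have step : ∀ ch, (PySem.Chars.isalpha ch || ch == '_') = true ∨
        (PySem.Chars.isalnum ch || ch == '_') = true →
        (if ch ∈ pvInvalidChars.toList then '_' else ch) = ch := by
      intro ch hch
      by_cases hm : ch ∈ pvInvalidChars.toList
      · exfalso
        obtain ⟨ha, hb, hu⟩ := invalid_not_ident ch hm
        rcases hch with hch | hch <;> simp [ha, hb, hu] at hch
      · simp [hm]
    simp only [List.map_cons]
    rw [step c (Or.inl h1)]
    congr 1
    have := List.map_congr_left fun ch hch => step ch (Or.inr (h2 ch hch))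
    simpa using this

theorem valid_eq (s : String) :
    (if pyIsIdentifierAscii (PySem.Str.lower s).toList then PySem.Str.lower s
     else pvInvalidChars.toList.foldl
       (fun t invalid_char => PySem.Str.replace t (String.ofList [invalid_char]) "_")
       (PySem.Str.lower s)) =
    String.ofList ((PySem.Str.lower s).toList.map
      (fun ch => if pvInvalidChars.toList.contains ch then '_' else ch)) := by
  have hmem : ∀ (l : List Char),
      l.map (fun ch => if pvInvalidChars.toList.contains ch then '_' else ch) =
      l.map (fun ch => if ch ∈ pvInvalidChars.toList then '_' else ch) := by
    intro l; refine List.map_congr_left fun ch _ => ?_; simp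
  by_cases hid : pyIsIdentifierAscii (PySem.Str.lower s).toList
  · rw [if_pos hid, hmem, ident_map_id _ hid]
    exact String.ofList_toList.symm
  · rw [if_neg hid]
    apply String.toList_injective
    rw [fold_str, fold_map _ underscore_not_invalid, hmem, String.toList_ofList]

theorem finish_eq (v : String) : pyFinishA v = pyFinishB v := rfl

-- ===== VERDICT (by name: the statement is the Claim_ definition above) =====
theorem get_python_identifier_py_spec : Claim_equal_get_python_identifier_py := by
  intro s _ _
  unfold Spec_get_python_identifier_py
  show pyFinishA
      (if pyIsIdentifierAscii (PySem.Str.lower s).toList then PySem.Str.lower s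
       else pvInvalidChars.toList.foldl
         (fun t invalid_char => PySem.Str.replace t (String.ofList [invalid_char]) "_")
         (PySem.Str.lower s)) =
    pyFinishB (String.ofList ((PySem.Str.lower s).toList.map
      (fun ch => if pvInvalidChars.toList.contains ch then '_' else ch)))
  rw [valid_eq s]
  exact finish_eq _
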